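-- pv_equiv track=rewrite | github.com/oxob3333/PlayBlind-Python | deckArray.py | hand_input_valid
-- ===== SOURCE A (Python) =====
-- def hand_input_valid(card_selection):
--     is_valid = True
--
--     if len(card_selection) == 0 or len(card_selection) > 5 or card_selection[0] == "":
--         is_valid = False
--
--     for i in range(len(card_selection)):
--         for j in range(i + 1, len(card_selection)):
--             if card_selection[i] == card_selection[j]:
--                 is_valid = False
--
--         if card_selection[i] not in ["1", "2", "3", "4", "5", "6", "7", "8"]:
--             is_valid = False
--
--     return is_valid
-- ===== SOURCE B (Python) =====
-- VALID_RANKS = {"1", "2", "3", "4", "5", "6", "7", "8"}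
--
--
-- def hand_input_valid(card_selection):
--     selected = set(card_selection)
--     return (1 <= len(card_selection) <= 5
--             and len(selected) == len(card_selection)
--             and selected <= VALID_RANKS)
-- ===== Notes on version B (the rewrite author's own statement) =====
-- stated objective: faster
-- what changed: Replaces the O(n^2) nested duplicate scan and the per-element membership loop with one set built once: duplicates detected by len(set(xs)) == len(xs) and validity by a subset test, with the length bounds as plain comparisons (the empty-first-element guard is subsumed because "" is never a valid rank).
import Mathlib
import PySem

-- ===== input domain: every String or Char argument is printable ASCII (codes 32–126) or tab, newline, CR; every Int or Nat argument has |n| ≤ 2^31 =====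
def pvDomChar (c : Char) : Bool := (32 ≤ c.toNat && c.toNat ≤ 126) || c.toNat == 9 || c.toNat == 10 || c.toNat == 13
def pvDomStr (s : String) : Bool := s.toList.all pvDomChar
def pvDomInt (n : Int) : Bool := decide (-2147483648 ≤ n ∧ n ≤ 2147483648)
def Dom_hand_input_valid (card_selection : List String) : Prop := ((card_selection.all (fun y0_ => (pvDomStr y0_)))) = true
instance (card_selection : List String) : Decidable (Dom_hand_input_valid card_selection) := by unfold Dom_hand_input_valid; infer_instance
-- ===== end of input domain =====

-- B replaces A's nested duplicate scan and per-element membership loop with one set built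
-- once (uniqueness = cardinality check, validity = subset test); idiomatic rewrite.

-- ===== PORT A =====
def hand_input_valid (card_selection : List String) : Bool :=
  -- is_valid = True; first guard (short-circuit 'or': [0] only read when nonempty,
  -- modelled by head? == some "")
  let is_valid := true
  let is_valid :=
    if card_selection.length == 0 || decide (card_selection.length > 5)
        || card_selection.head? == some "" then false else is_valid
  -- for i in range(len): inner for j in range(i+1, len) duplicate scan, then membership test
  (List.range card_selection.length).foldl
    (fun v i =>
      let v := (List.range' (i + 1) (card_selection.length - (i + 1))).foldl
        (fun v j => if card_selection.getD i "" == card_selection.getD j "" then false else v) v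
      if (["1", "2", "3", "4", "5", "6", "7", "8"] : List String).contains
          (card_selection.getD i "") then v else false)
    is_valid

-- ===== PORT B =====
def pvValidRanks : PySem.Set String :=
  PySem.Set.ofList ["1", "2", "3", "4", "5", "6", "7", "8"]

def hand_input_valid_alt (card_selection : List String) : Bool :=
  let selected : PySem.Set String := PySem.Set.ofList card_selection
  decide (1 ≤ card_selection.length) && decide (card_selection.length ≤ 5)
    && (selected.length == card_selection.length)
    && PySem.Set.issubset selected pvValidRanks

-- ===== PRECONDITION & SPEC =====
def Spec_hand_input_valid (card_selection : List String) (out : Bool) : Prop := out = hand_input_valid_alt card_selection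
instance (card_selection : List String) (out : Bool) : Decidable (Spec_hand_input_valid card_selection out) := by unfold Spec_hand_input_valid; infer_instance

-- ===== CLAIM (what is proved, stated in full; the proofs are below) =====
def Claim_equal_hand_input_valid : Prop := ∀ (card_selection : List String), Dom_hand_input_valid card_selection → Spec_hand_input_valid card_selection (hand_input_valid card_selection)

-- ===== LEMMAS AND PROOFS =====

-- The common meaning of both programs.
def HandOK (cs : List String) : Prop :=
  1 ≤ cs.length ∧ cs.length ≤ 5 ∧ cs.Nodup ∧
    ∀ x ∈ cs, x ∈ (["1", "2", "3", "4", "5", "6", "7", "8"] : List String)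

-- B-side: cardinality of a fold of Set.add
theorem foldl_add_length_le {α : Type} [BEq α] (xs : List α) :
    ∀ s : PySem.Set α, (xs.foldl PySem.Set.add s).length ≤ s.length + xs.length := by
  induction xs with
  | nil => intro s; simp
  | cons x xs ih =>
    intro s
    simp only [List.foldl_cons]
    have h := ih (PySem.Set.add s x)
    have hlen : (PySem.Set.add s x).length ≤ s.length + 1 := by
      unfold PySem.Set.add; split <;> simp
    simp only [List.length_cons]
    omega

theorem foldl_add_length_eq_iff {α : Type} [BEq α] [LawfulBEq α] (xs : List α) :
    ∀ s : PySem.Set α,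
      ((xs.foldl PySem.Set.add s).length = s.length + xs.length) ↔
        (xs.Nodup ∧ ∀ y ∈ xs, y ∉ s) := by
  induction xs with
  | nil => intro s; simp
  | cons x xs ih =>
    intro s
    simp only [List.foldl_cons, List.length_cons, List.nodup_cons, List.mem_cons]
    by_cases hc : s.contains x = true
    · have hmem : x ∈ s := by simpa using hc
      have hadd : PySem.Set.add s x = s := by unfold PySem.Set.add; rw [if_pos hc]
      rw [hadd]
      have hle := foldl_add_length_le xs s
      constructor
      · intro h; omega
      · rintro ⟨-, h⟩
        exact absurd hmem (h x (Or.inl rfl))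
    · have hnm : x ∉ s := by simpa using hc
      have hadd : PySem.Set.add s x = s ++ [x] := by unfold PySem.Set.add; rw [if_neg hc]
      rw [hadd, show s.length + (xs.length + 1) = (s ++ [x]).length + xs.length by simp; omega,
        ih (s ++ [x])]
      simp only [List.mem_append, List.mem_singleton, not_or]
      constructor
      · rintro ⟨hnd, h⟩
        refine ⟨⟨fun hx => (h x hx).2 rfl, hnd⟩, ?_⟩
        rintro y (rfl | hy)
        · exact hnm
        · exact (h y hy).1
      · rintro ⟨⟨hxs, hnd⟩, h⟩
        refine ⟨hnd, fun y hy => ⟨h y (Or.inr hy), fun hyx => hxs (hyx ▸ hy)⟩⟩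

theorem length_ofList_eq_iff {α : Type} [BEq α] [LawfulBEq α] (xs : List α) :
    (PySem.Set.ofList xs).length = xs.length ↔ xs.Nodup := by
  have := foldl_add_length_eq_iff xs (PySem.Set.empty (α := α))
  simpa [PySem.Set.ofList, PySem.Set.empty] using this

theorem alt_iff (cs : List String) : hand_input_valid_alt cs = true ↔ HandOK cs := by
  simp only [hand_input_valid_alt, HandOK, Bool.and_eq_true, decide_eq_true_eq, beq_iff_eq,
    PySem.Set.issubset, List.all_eq_true]
  constructor
  · rintro ⟨⟨⟨h1, h2⟩, h3⟩, h4⟩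
    refine ⟨h1, h2, (length_ofList_eq_iff cs).1 h3, fun x hx => ?_⟩
    have := h4 x ((PySem.Set.mem_ofList cs x).2 hx)
    simpa [pvValidRanks, PySem.Set.mem_ofList, List.contains_iff_mem] using this
  · rintro ⟨h1, h2, h3, h4⟩
    refine ⟨⟨⟨h1, h2⟩, (length_ofList_eq_iff cs).2 h3⟩, fun x hx => ?_⟩
    have := h4 x ((PySem.Set.mem_ofList cs x).1 hx)
    simpa [pvValidRanks, PySem.Set.mem_ofList, List.contains_iff_mem] using this

-- A-side: shapes of A's two loops
theorem foldl_if_false {α : Type} (p : α → Bool) :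
    ∀ (l : List α) (v : Bool),
      l.foldl (fun v j => if p j then false else v) v = (v && !(l.any p)) := by
  intro l
  induction l with
  | nil => intro v; simp
  | cons a l ih =>
    intro v
    rw [List.foldl_cons, ih]
    by_cases h : p a = true <;> simp [h]

theorem foldl_and {α : Type} (g : α → Bool) :
    ∀ (l : List α) (v : Bool), l.foldl (fun v i => v && g i) v = (v && l.all g) := by
  intro l
  induction l with
  | nil => intro v; simp
  | cons a l ih => intro v; simp [ih, Bool.and_assoc]

theorem a_eq_and_all (cs : List String) :
    hand_input_valid cs =
      ((if cs.length == 0 || decide (cs.length > 5) || cs.head? == some "" then false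
          else true) &&
        (List.range cs.length).all (fun i =>
          !((List.range' (i + 1) (cs.length - (i + 1))).any
              (fun j => cs.getD i "" == cs.getD j "")) &&
            (["1", "2", "3", "4", "5", "6", "7", "8"] : List String).contains
              (cs.getD i ""))) := by
  unfold hand_input_valid
  rw [show (fun (v : Bool) (i : Nat) =>
      let v := (List.range' (i + 1) (cs.length - (i + 1))).foldl
        (fun v j => if cs.getD i "" == cs.getD j "" then false else v) v
      if (["1", "2", "3", "4", "5", "6", "7", "8"] : List String).contains
          (cs.getD i "") then v else false) =
    (fun (v : Bool) (i : Nat) => v &&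
      (!((List.range' (i + 1) (cs.length - (i + 1))).any
          (fun j => cs.getD i "" == cs.getD j "")) &&
        (["1", "2", "3", "4", "5", "6", "7", "8"] : List String).contains
          (cs.getD i ""))) from ?_]
  · exact foldl_and _ _ _
  · funext v i
    rw [foldl_if_false]
    cases v <;> simp [Bool.and_comm]

theorem getD_eq_getElem' (cs : List String) (i : Nat) (hi : i < cs.length) :
    cs.getD i "" = cs[i] := List.getD_eq_getElem cs "" hi

theorem a_iff (cs : List String) : hand_input_valid cs = true ↔ HandOK cs := by
  rw [a_eq_and_all]
  simp only [Bool.and_eq_true, List.all_eq_true, List.mem_range, Bool.not_eq_eq_eq_not,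
    Bool.not_true, List.any_eq_false, List.mem_range'_1, beq_iff_eq, List.contains_iff_mem,
    HandOK]
  constructor
  · rintro ⟨hg, hall⟩
    have hguard : ¬(cs.length == 0 || decide (cs.length > 5) || cs.head? == some "") = true := by
      intro h; rw [if_pos h] at hg; exact Bool.false_ne_true hg
    simp only [Bool.or_eq_true, beq_iff_eq, decide_eq_true_eq, not_or] at hguard
    obtain ⟨⟨hne, hle⟩, -⟩ := hguard
    refine ⟨by omega, by omega, ?_, ?_⟩
    · rw [List.nodup_iff_getElem?_ne_getElem?]
      intro i j hij hj hEq
      have hi : i < cs.length := lt_trans hij hj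
      have h1 := (hall i hi).1 j ⟨by omega, by omega⟩
      apply h1
      rw [getD_eq_getElem' cs i hi, getD_eq_getElem' cs j hj]
      rw [List.getElem?_eq_getElem hi, List.getElem?_eq_getElem hj] at hEq
      exact Option.some_injective _ hEq
    · intro x hx
      obtain ⟨i, hi, rfl⟩ := List.mem_iff_getElem.1 hx
      have := (hall i hi).2
      rwa [getD_eq_getElem' cs i hi] at this
  · rintro ⟨h1, h2, hnd, hv⟩
    have hhead : cs.head? ≠ some "" := by
      intro h
      have hm : "" ∈ cs := by
        rcases cs with _ | ⟨a, t⟩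
        · simp at h
        · simp at h; subst h; exact List.mem_cons_self ..
      have := hv "" hm; simp at this
    refine ⟨?_, ?_⟩
    · rw [if_neg]
      simp only [Bool.or_eq_true, beq_iff_eq, decide_eq_true_eq, not_or]
      exact ⟨⟨by omega, by omega⟩, by simpa using hhead⟩
    · intro i hi
      refine ⟨fun j hj => ?_, ?_⟩
      · obtain ⟨hj1, hj2⟩ := hj
        have hjlen : j < cs.length := by omega
        have hne := List.nodup_iff_getElem?_ne_getElem?.1 hnd i j (by omega) hjlen
        rw [getD_eq_getElem' cs i hi, getD_eq_getElem' cs j hjlen]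
        intro hEq
        apply hne
        rw [List.getElem?_eq_getElem hi, List.getElem?_eq_getElem hjlen, hEq]
      · rw [getD_eq_getElem' cs i hi]
        exact hv _ (List.getElem_mem hi)

-- ===== VERDICT (by name: the statement is the Claim_ definition above) =====
theorem hand_input_valid_spec : Claim_equal_hand_input_valid := by
  intro cs _
  unfold Spec_hand_input_valid
  rw [Bool.eq_iff_iff, a_iff, alt_iff]
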